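-- pv_equiv track=rewrite | github.com/TIES-Lab/attnbreaker | attn_breaker_utils.py | logarithmic_indices
-- ===== SOURCE A (Python) =====
-- def logarithmic_indices(start, x):
--     # Ensure start is at least 0
--     if start < 0:
--         start = 0
--
--     # Initialize indices list starting from the range [start, min(10, x)]
--     indices = list(range(start, min(10, x+1)))
--
--     power = 1
--     while 10 ** power <= x:
--         for i in range(1, 10):  # Add multiples of 10^power (10, 20, ..., 90)
--             value = i * (10 ** power)
--             if value > x:
--                 break
--             if value >= start:
--                 indices.append(value)
--         power += 1
--
--     # Include the final value x if it's not already in the list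
--     if x >= start:
--         indices.append(x)
--
--     return sorted(set(indices))
-- ===== SOURCE B (Python) =====
-- def _rounds(x):
--     # Ascending list of the nonnegative integers <= x with at most one
--     # significant digit (0..9, 10..90, 100..900, ...), built by structural
--     # recursion on x // 10: a number >= 10 is round iff it is 10*r for a
--     # round r >= 1, r <= x // 10.
--     if x < 0:
--         return []
--     if x < 10:
--         return list(range(0, x + 1))
--     return list(range(0, 10)) + [10 * r for r in _rounds(x // 10) if r >= 1]
--
--
-- def logarithmic_indices(start, x):
--     s = max(start, 0)
--     out = [v for v in _rounds(x) if v >= s]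
--     if x >= s and (not out or out[-1] != x):
--         out.append(x)
--     return out
-- ===== Notes on version B (the rewrite author's own statement) =====
-- stated objective: alternative
-- what changed: Instead of A's enumerate-powers loop feeding a set that is finally sorted, B builds the answer already in ascending order by structural recursion on x//10 (a round number >= 10 is 10*r for a round r >= 1), filters once by the clamped start, and appends x at the end when missing - no set and no sorting pass.
import Mathlib
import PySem

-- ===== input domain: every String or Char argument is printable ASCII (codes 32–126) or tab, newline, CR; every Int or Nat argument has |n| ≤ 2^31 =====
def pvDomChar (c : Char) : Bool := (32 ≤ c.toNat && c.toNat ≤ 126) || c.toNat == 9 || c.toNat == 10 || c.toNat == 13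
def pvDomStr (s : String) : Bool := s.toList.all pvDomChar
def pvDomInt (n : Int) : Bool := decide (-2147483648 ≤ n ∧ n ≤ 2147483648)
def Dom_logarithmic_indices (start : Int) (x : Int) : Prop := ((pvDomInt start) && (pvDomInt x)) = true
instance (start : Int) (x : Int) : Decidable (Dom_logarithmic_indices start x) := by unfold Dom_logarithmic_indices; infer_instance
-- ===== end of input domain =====

-- B replaces A's enumerate-powers-into-a-set-then-sort construction by a direct build of the
-- answer in ascending order: structural recursion on x // 10 produces the round numbers sorted,
-- one filter applies the clamped start, and x is appended at the end when missing.

-- ===== PORT A =====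
-- inner 'for i in range(1,10)' with its break (value > x) and filter (value >= start)
def pvInnerA (start x pow10 : Int) : List Int → List Int → List Int
  | [], acc => acc
  | i :: rest, acc =>
    let value := i * pow10
    if value > x then acc
    else if value ≥ start then pvInnerA start x pow10 rest (acc ++ [value])
    else pvInnerA start x pow10 rest acc

-- 'while 10 ** power <= x' loop of A
def pvWhileA (start x : Int) (power : Nat) (acc : List Int) : List Int :=
  if h : (10:Int) ^ power ≤ x then
    pvWhileA start x (power + 1) (pvInnerA start x ((10:Int) ^ power) (PySem.List.pyRange 1 10 1) acc)
  else acc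
  termination_by x.toNat + 1 - 10 ^ power
  decreasing_by
    have hx : (0:Int) ≤ x := le_trans (by positivity) h
    have h1 : (10:Nat) ^ power ≤ x.toNat := by
      rw [Int.le_toNat hx]; push_cast; exact h
    have h2 : (10:Nat) ^ power < 10 ^ (power + 1) :=
      Nat.pow_lt_pow_succ (by norm_num)
    omega

def logarithmic_indices (start : Int) (x : Int) : List Int :=
  let start := if start < 0 then 0 else start
  let indices := PySem.List.pyRange start (min 10 (x + 1)) 1
  let indices := pvWhileA start x 1 indices
  let indices := if x ≥ start then indices ++ [x] else indices
  PySem.List.sorted (PySem.Set.ofList indices) (fun v => v) false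

-- ===== PORT B =====
-- '_rounds(x)': ascending list of nonnegative one-significant-digit integers ≤ x,
-- by structural recursion on x // 10; the comprehension is filter-then-map.
def pvRounds (x : Int) : List Int :=
  if x < 0 then []
  else if x < 10 then PySem.List.pyRange 0 (x + 1) 1
  else PySem.List.pyRange 0 10 1 ++
       ((pvRounds (PySem.Int.floordiv x 10)).filter (fun r => decide (1 ≤ r))).map
         (fun r => 10 * r)
  termination_by x.toNat
  decreasing_by
    rename_i h1 h2
    rw [PySem.Int.floordiv_eq_ediv_of_pos (by norm_num)]
    omega

def logarithmic_indices_alt (start : Int) (x : Int) : List Int :=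
  let s := max start 0
  let out := (pvRounds x).filter (fun v => decide (s ≤ v))
  if x ≥ s ∧ (out = [] ∨ out.getLast? ≠ some x) then out ++ [x] else out

-- ===== PRECONDITION & SPEC =====
def Spec_logarithmic_indices (start : Int) (x : Int) (out : List Int) : Prop := out = logarithmic_indices_alt start x
instance (start : Int) (x : Int) (out : List Int) : Decidable (Spec_logarithmic_indices start x out) := by unfold Spec_logarithmic_indices; infer_instance

-- ===== CLAIM (what is proved, stated in full; the proofs are below) =====
def Claim_equal_logarithmic_indices : Prop := ∀ (start : Int) (x : Int), Dom_logarithmic_indices start x → Spec_logarithmic_indices start x (logarithmic_indices start x)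

-- ===== LEMMAS AND PROOFS =====

lemma pow10_mono {p q : Nat} (h : p ≤ q) : (10:Int) ^ p ≤ 10 ^ q :=
  pow_le_pow_right₀ (by norm_num) h

lemma innerA_mem (s x P : Int) (hP : 0 < P) (ds : List Int)
    (hs : ds.Pairwise (fun a b => a ≤ b)) (acc : List Int) (v : Int) :
    v ∈ pvInnerA s x P ds acc ↔ v ∈ acc ∨ ∃ d ∈ ds, d * P ≤ x ∧ s ≤ d * P ∧ v = d * P := by
  induction ds generalizing acc with
  | nil => simp [pvInnerA]
  | cons d rest ih =>
    have hhd : ∀ d' ∈ rest, d ≤ d' := (List.pairwise_cons.mp hs).1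
    have hrest := (List.pairwise_cons.mp hs).2
    rw [pvInnerA]
    by_cases hbx : d * P > x
    · simp only [if_pos hbx]
      constructor
      · exact Or.inl
      · rintro (h | ⟨d', hd', hle, _, _⟩)
        · exact h
        · exfalso
          rcases List.mem_cons.mp hd' with rfl | h1
          · omega
          · have : d * P ≤ d' * P := mul_le_mul_of_nonneg_right (hhd _ h1) hP.le
            omega
    · simp only [if_neg hbx]
      by_cases hge : d * P ≥ s
      · rw [if_pos hge, ih hrest]
        simp only [List.mem_append, List.mem_cons, List.not_mem_nil, or_false]
        constructor
        · rintro ((h | h) | ⟨d', hd', h1, h2, h3⟩)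
          · exact Or.inl h
          · exact Or.inr ⟨d, Or.inl rfl, by omega, by omega, h⟩
          · exact Or.inr ⟨d', Or.inr hd', h1, h2, h3⟩
        · rintro (h | ⟨d', hd', h1, h2, h3⟩)
          · exact Or.inl (Or.inl h)
          · rcases hd' with rfl | h4
            · exact Or.inl (Or.inr h3)
            · exact Or.inr ⟨d', h4, h1, h2, h3⟩
      · rw [if_neg hge, ih hrest]
        constructor
        · rintro (h | ⟨d', hd', h1, h2, h3⟩)
          · exact Or.inl h
          · exact Or.inr ⟨d', List.mem_cons_of_mem _ hd', h1, h2, h3⟩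
        · rintro (h | ⟨d', hd', h1, h2, h3⟩)
          · exact Or.inl h
          · rcases List.mem_cons.mp hd' with rfl | h4
            · exfalso; omega
            · exact Or.inr ⟨d', h4, h1, h2, h3⟩

lemma whileA_mem (s x : Int) (p : Nat) (acc : List Int) (v : Int) :
    v ∈ pvWhileA s x p acc ↔ v ∈ acc ∨
      ∃ (q : Nat) (d : Int), p ≤ q ∧ 1 ≤ d ∧ d < 10 ∧ d * 10 ^ q ≤ x ∧ s ≤ d * 10 ^ q ∧
        v = d * 10 ^ q := by
  fun_induction pvWhileA s x p acc with
  | case1 p acc h ih =>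
    rw [ih, innerA_mem s x _ (by positivity) _ (by decide)]
    constructor
    · rintro ((h0 | ⟨d, hd, h1, h2, h3⟩) | ⟨q, d, hq, h1, h2, h3, h4, h5⟩)
      · exact Or.inl h0
      · rw [PySem.List.mem_pyRange_one] at hd
        exact Or.inr ⟨p, d, le_refl _, by omega, by omega, h1, h2, h3⟩
      · exact Or.inr ⟨q, d, by omega, h1, h2, h3, h4, h5⟩
    · rintro (h0 | ⟨q, d, hq, h1, h2, h3, h4, h5⟩)
      · exact Or.inl (Or.inl h0)
      · rcases Nat.eq_or_lt_of_le hq with rfl | hlt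
        · exact Or.inl (Or.inr ⟨d, PySem.List.mem_pyRange_one.mpr (by omega), h3, h4, h5⟩)
        · exact Or.inr ⟨q, d, by omega, h1, h2, h3, h4, h5⟩
  | case2 p acc h =>
    constructor
    · exact Or.inl
    · rintro (h0 | ⟨q, d, hq, h1, h2, h3, h4, h5⟩)
      · exact h0
      · exfalso
        have hm : (10:Int) ^ p ≤ 10 ^ q := pow10_mono hq
        have : (10:Int) ^ q ≤ d * 10 ^ q :=
          le_mul_of_one_le_left (by positivity) h1
        omega

-- membership characterization of B's round-number list
lemma rounds_mem (x : Int) : ∀ v : Int,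
    v ∈ pvRounds x ↔ 0 ≤ v ∧ v ≤ x ∧
      (v < 10 ∨ ∃ (q : Nat) (d : Int), 1 ≤ q ∧ 1 ≤ d ∧ d < 10 ∧ v = d * 10 ^ q) := by
  fun_induction pvRounds x with
  | case1 x h =>
    intro v
    simp only [List.not_mem_nil, false_iff]
    rintro ⟨h1, h2, _⟩; omega
  | case2 x h1 h2 =>
    intro v
    rw [PySem.List.mem_pyRange_one]
    constructor
    · rintro ⟨ha, hb⟩; exact ⟨ha, by omega, Or.inl (by omega)⟩
    · rintro ⟨ha, hb, _⟩; exact ⟨ha, by omega⟩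
  | case3 x h1 h2 ih =>
    intro v
    have hdiv : PySem.Int.floordiv x 10 = x / 10 :=
      PySem.Int.floordiv_eq_ediv_of_pos (by norm_num)
    have hbr : ∀ r : Int, r ≤ PySem.Int.floordiv x 10 ↔ r * 10 ≤ x := fun r =>
      PySem.Int.le_floordiv_iff_mul_le (by norm_num)
    simp only [List.mem_append, List.mem_map, List.mem_filter, PySem.List.mem_pyRange_one,
      decide_eq_true_eq]
    constructor
    · rintro (⟨ha, hb⟩ | ⟨r, ⟨hr, hr1⟩, rfl⟩)
      · exact ⟨ha, by omega, Or.inl hb⟩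
      · obtain ⟨ha, hb, hc⟩ := (ih r).mp hr
        have hvx : 10 * r ≤ x := by have := (hbr r).mp hb; omega
        refine ⟨by omega, hvx, Or.inr ?_⟩
        rcases hc with hlt | ⟨q, d, hq, hd1, hd2, rfl⟩
        · exact ⟨1, r, le_refl _, hr1, hlt, by ring⟩
        · exact ⟨q + 1, d, by omega, hd1, hd2, by ring⟩
    · rintro ⟨ha, hb, hc | ⟨q, d, hq, hd1, hd2, rfl⟩⟩
      · exact Or.inl ⟨ha, hc⟩
      · right
        refine ⟨d * 10 ^ (q - 1), ?_, ?_⟩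
        · have h10 : (1:Int) ≤ 10 ^ (q - 1) := one_le_pow₀ (by norm_num)
          have hr1 : (1:Int) ≤ d * 10 ^ (q - 1) :=
            one_le_mul_of_one_le_of_one_le hd1 h10
          refine ⟨(ih _).mpr ⟨by omega, ?_, ?_⟩, hr1⟩
          · rw [hbr]
            have : d * 10 ^ (q - 1) * 10 = d * 10 ^ q := by
              rw [mul_assoc]
              congr 1
              rw [← pow_succ]
              congr 1
              omega
            omega
          · rcases Nat.eq_or_lt_of_le hq with h | h
            · left; simp [← h, hd2]
            · exact Or.inr ⟨q - 1, d, by omega, hd1, hd2, rfl⟩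
        · have : (10:Int) ^ q = 10 * 10 ^ (q - 1) := by
            rw [← pow_succ']
            congr 1
            omega
          rw [this]; ring

lemma rounds_pairwise (x : Int) : (pvRounds x).Pairwise (· < ·) := by
  fun_induction pvRounds x with
  | case1 x h => exact List.Pairwise.nil
  | case2 x h1 h2 => exact PySem.List.pairwise_lt_pyRange_one 0 (x + 1)
  | case3 x h1 h2 ih =>
    rw [List.pairwise_append]
    refine ⟨PySem.List.pairwise_lt_pyRange_one 0 10, ?_, ?_⟩
    · rw [List.pairwise_map]
      exact (ih.filter _).imp (fun h => by omega)
    · intro a ha b hb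
      rw [PySem.List.mem_pyRange_one] at ha
      obtain ⟨r, hr, rfl⟩ := List.mem_map.mp hb
      have := (List.mem_filter.mp hr).2
      simp only [decide_eq_true_eq] at this
      omega

-- in a strictly increasing list, an upper-bound member is the last element
lemma last_of_mem_max {l : List Int} (hp : l.Pairwise (· < ·)) {x : Int} (hx : x ∈ l)
    (hmax : ∀ a ∈ l, a ≤ x) : l.getLast? = some x := by
  induction l with
  | nil => cases hx
  | cons a t ih =>
    cases t with
    | nil => simp_all
    | cons b u =>
      rw [List.getLast?_cons_cons]
      have hpt := (List.pairwise_cons.mp hp).2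
      have hab : ∀ c ∈ b :: u, a < c := (List.pairwise_cons.mp hp).1
      rcases List.mem_cons.mp hx with rfl | hxt
      · exact absurd (hmax b (by simp)) (by have := hab b (by simp); omega)
      · exact ih hpt hxt (fun c hc => hmax c (List.mem_cons_of_mem _ hc))

-- B's output: membership
lemma altB_mem (s x v : Int) :
    (v ∈ (if x ≥ s ∧ ((pvRounds x).filter (fun v => decide (s ≤ v)) = [] ∨
            ((pvRounds x).filter (fun v => decide (s ≤ v))).getLast? ≠ some x)
          then (pvRounds x).filter (fun v => decide (s ≤ v)) ++ [x]
          else (pvRounds x).filter (fun v => decide (s ≤ v)))) ↔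
    ((v ∈ pvRounds x ∧ s ≤ v) ∨ (x ≥ s ∧ v = x)) := by
  set out := (pvRounds x).filter (fun v => decide (s ≤ v)) with hout
  have hmem : ∀ w, w ∈ out ↔ w ∈ pvRounds x ∧ s ≤ w := by
    intro w; rw [hout, List.mem_filter, decide_eq_true_eq]
  split
  · rename_i hc
    simp only [List.mem_append, List.mem_cons, List.not_mem_nil, or_false, hmem]
    constructor
    · rintro (h | rfl)
      · exact Or.inl h
      · exact Or.inr ⟨hc.1, rfl⟩
    · rintro (h | ⟨_, rfl⟩)
      · exact Or.inl h
      · exact Or.inr rfl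
  · rename_i hc
    rw [hmem]
    constructor
    · exact Or.inl
    · rintro (h | ⟨hxs, rfl⟩)
      · exact h
      · -- the append was skipped: out ≠ [] and its last element is x, so x ∈ out
        rw [not_and_or] at hc
        rcases hc with hc | hc
        · exact absurd hxs hc
        · rw [not_or, not_ne_iff] at hc
          have : v ∈ out := by
            have h1 : out ≠ [] := hc.1
            have h2 := List.getLast?_eq_getLast h1 ▸ hc.2
            have := List.getLast_mem h1
            simp only [Option.some.injEq] at h2
            rwa [h2] at this
          rwa [hmem] at this

-- B's output: strictly increasing
lemma altB_pairwise (s x : Int) :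
    (if x ≥ s ∧ ((pvRounds x).filter (fun v => decide (s ≤ v)) = [] ∨
         ((pvRounds x).filter (fun v => decide (s ≤ v))).getLast? ≠ some x)
       then (pvRounds x).filter (fun v => decide (s ≤ v)) ++ [x]
       else (pvRounds x).filter (fun v => decide (s ≤ v))).Pairwise (· < ·) := by
  set out := (pvRounds x).filter (fun v => decide (s ≤ v)) with hout
  have hpw : out.Pairwise (· < ·) := (rounds_pairwise x).filter _
  split
  · rename_i hc
    rw [List.pairwise_append]
    refine ⟨hpw, List.pairwise_singleton _ _, ?_⟩
    intro a ha b hb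
    rw [List.mem_singleton] at hb
    rw [hb]
    have hale : a ≤ x := by
      have := (List.mem_filter.mp ha).1
      exact ((rounds_mem x a).mp this).2.1
    by_cases hax : a = x
    · -- x itself were in out: then out's last element is x, contradicting the guard
      exfalso
      have hmax : ∀ b ∈ out, b ≤ x := fun b hb =>
        ((rounds_mem x b).mp (List.mem_filter.mp hb).1).2.1
      have hlast := last_of_mem_max hpw (hax ▸ ha) hmax
      rcases hc.2 with h | h
      · rw [h] at ha; cases ha
      · exact h hlast
    · omega
  · exact hpw

-- the two programs collect the same set of values
lemma memAB (s x v : Int) (hs : 0 ≤ s) :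
    (v ∈ (if x ≥ s then pvWhileA s x 1 (PySem.List.pyRange s (min 10 (x + 1)) 1) ++ [x]
          else pvWhileA s x 1 (PySem.List.pyRange s (min 10 (x + 1)) 1))) ↔
    ((v ∈ pvRounds x ∧ s ≤ v) ∨ (x ≥ s ∧ v = x)) := by
  have hA := whileA_mem s x 1 (PySem.List.pyRange s (min 10 (x + 1)) 1) v
  rw [rounds_mem]
  have hv10 : ∀ (q : Nat) (d : Int), 1 ≤ q → 1 ≤ d → (10:Int) ≤ d * 10 ^ q := by
    intro q d hq hd
    have h1 : (10:Int) ^ 1 ≤ 10 ^ q := pow10_mono hq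
    have h2 : (10:Int) ^ q ≤ d * 10 ^ q := le_mul_of_one_le_left (by positivity) hd
    simp only [pow_one] at h1
    omega
  by_cases hxs : x ≥ s
  · simp only [if_pos hxs, List.mem_append, List.mem_cons, List.not_mem_nil, or_false, hA,
      PySem.List.mem_pyRange_one]
    constructor
    · rintro ((⟨h1, h2⟩ | ⟨q, d, hq, hd1, hd2, hle, hge, rfl⟩) | rfl)
      · simp only [lt_min_iff] at h2
        exact Or.inl ⟨⟨by omega, by omega, Or.inl (by omega)⟩, h1⟩
      · exact Or.inl ⟨⟨by omega, hle, Or.inr ⟨q, d, hq, hd1, hd2, rfl⟩⟩, hge⟩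
      · exact Or.inr ⟨hxs, rfl⟩
    · rintro (⟨⟨h0, h1, hc | ⟨q, d, hq, hd1, hd2, rfl⟩⟩, h2⟩ | ⟨_, rfl⟩)
      · exact Or.inl (Or.inl ⟨h2, by simp only [lt_min_iff]; omega⟩)
      · exact Or.inl (Or.inr ⟨q, d, hq, hd1, hd2, h1, h2, rfl⟩)
      · exact Or.inr rfl
  · simp only [if_neg hxs, hA, PySem.List.mem_pyRange_one]
    constructor
    · rintro (⟨h1, h2⟩ | ⟨q, d, hq, hd1, hd2, hle, hge, rfl⟩)
      · simp only [lt_min_iff] at h2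
        exact Or.inl ⟨⟨by omega, by omega, Or.inl (by omega)⟩, h1⟩
      · exact Or.inl ⟨⟨by omega, hle, Or.inr ⟨q, d, hq, hd1, hd2, rfl⟩⟩, hge⟩
    · rintro (⟨⟨h0, h1, hc | ⟨q, d, hq, hd1, hd2, rfl⟩⟩, h2⟩ | ⟨hxs', _⟩)
      · exact Or.inl ⟨h2, by simp only [lt_min_iff]; omega⟩
      · exact Or.inr ⟨q, d, hq, hd1, hd2, h1, h2, rfl⟩
      · exact absurd hxs' hxs

-- ===== VERDICT (by name: the statement is the Claim_ definition above) =====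
theorem logarithmic_indices_spec : Claim_equal_logarithmic_indices := by
  intro start x _
  show logarithmic_indices start x = logarithmic_indices_alt start x
  unfold logarithmic_indices logarithmic_indices_alt
  have hclamp : (if start < 0 then (0:Int) else start) = max start 0 := by
    split <;> omega
  rw [hclamp]
  set s := max start 0 with hsdef
  have hs : 0 ≤ s := le_max_right _ _
  apply PySem.List.sorted_eq_of_perm_of_pairwise_lt
  · rw [List.perm_ext_iff_of_nodup
      ((altB_pairwise s x).imp (fun h => ne_of_lt h))
      (PySem.Set.nodup_ofList _)]
    intro v
    rw [PySem.Set.mem_ofList, altB_mem, memAB s x v hs]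
  · exact altB_pairwise s x
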